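-- pv_equiv track=rewrite | github.com/Arsen1302/Code-copy-detector | TestData/solutions/problem_709_1.py | solution_709_1
-- ===== SOURCE A (Python) =====
-- def solution_709_1(costs):
--     """
--     :type costs: List[List[int]]
--     :rtype: int
--     """
--     a = sorted(costs, key=lambda x: x[0]-x[1])
--     Sa = 0
--     Sb = 0
--     for i in range(len(a)//2):
--         Sa += a[i][0]
--
--     for i in range(len(a)//2, len(a)):
--         Sb += a[i][1]
--     return Sa + Sb
-- ===== SOURCE B (Python) =====
-- def solution_709_1(costs):
--     # Quickselect-style 3-way partitioning: sum everyone's B-city cost, then add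
--     # the n//2 smallest differences c[0]-c[1] without ever sorting (ties cannot
--     # affect the sum of the k smallest values).
--     base = sum(c[1] for c in costs)
--     l = [c[0] - c[1] for c in costs]
--     k = len(l) // 2
--     total = 0
--     while k > 0:
--         p = l[len(l) // 2]
--         lt = [x for x in l if x < p]
--         eq = [x for x in l if x == p]
--         gt = [x for x in l if x > p]
--         if k <= len(lt):
--             l = lt
--         elif k <= len(lt) + len(eq):
--             total += sum(lt) + p * (k - len(lt))
--             k = 0
--         else:
--             total += sum(lt) + sum(eq)
--             k -= len(lt) + len(eq)
--             l = gt
--     return base + total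
-- ===== Notes on version B (the rewrite author's own statement) =====
-- stated objective: alternative
-- what changed: B never sorts: it sums all second-city costs once and adds the n//2 smallest differences c[0]-c[1] by an iterative 3-way-partition quickselect (middle-element pivot) that accumulates whole-partition sums; ties cannot affect the sum of the k smallest values.
-- outside the precondition, e.g. on solution_709_1([[1], [2, 3]]): A raises IndexError, B raises IndexError
import Mathlib
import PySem

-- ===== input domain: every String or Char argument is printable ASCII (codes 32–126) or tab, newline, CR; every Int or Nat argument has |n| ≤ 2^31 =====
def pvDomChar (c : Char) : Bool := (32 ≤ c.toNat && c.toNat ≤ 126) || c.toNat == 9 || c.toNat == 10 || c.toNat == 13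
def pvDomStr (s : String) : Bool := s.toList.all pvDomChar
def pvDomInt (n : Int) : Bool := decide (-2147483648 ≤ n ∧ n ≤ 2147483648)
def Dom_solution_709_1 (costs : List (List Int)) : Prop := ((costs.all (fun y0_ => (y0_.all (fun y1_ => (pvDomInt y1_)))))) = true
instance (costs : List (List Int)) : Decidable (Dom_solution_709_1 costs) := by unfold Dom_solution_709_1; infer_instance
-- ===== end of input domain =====

-- B is a different algorithm, not claimed faster: it sums all second-city costs once and
-- adds the n//2 smallest differences c[0]-c[1] by a 3-way-partition quickselect
-- (middle-element pivot) instead of sorting; ties cannot affect the sum of the k smallest.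

-- ===== PORT A =====
-- row indexing c[0] / c[1]: pyGetD is exact under Pre_ (every row has length ≥ 2)
def solution_709_1 (costs : List (List Int)) : Int :=
  let a := PySem.List.sorted costs (fun x => PySem.List.pyGetD x 0 0 - PySem.List.pyGetD x 1 0)
  let sa := (PySem.List.pyRange 0 (PySem.Int.floordiv (PySem.List.len a) 2)).foldl
      (fun s i => s + PySem.List.pyGetD (PySem.List.pyGetD a i []) 0 0) 0
  let sb := (PySem.List.pyRange (PySem.Int.floordiv (PySem.List.len a) 2) (PySem.List.len a)).foldl
      (fun s i => s + PySem.List.pyGetD (PySem.List.pyGetD a i []) 1 0) 0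
  sa + sb

-- ===== PORT B =====
-- termination helper for the quickselect recursion: a filter that drops the pivot shrinks
theorem pvFilter_lt_of_mem {α : Type} {l : List α} {p : α} {q : α → Bool} (hp : p ∈ l) (hq : q p = false) :
    (l.filter q).length < l.length := by
  refine lt_of_le_of_ne (List.length_filter_le _ _) (fun hEq => ?_)
  have := (List.length_filter_eq_length_iff).mp hEq p hp
  simp [hq] at this

-- pivot of a nonempty list is in range
theorem pvPivot_inRange (l : List Int) (hl : l ≠ []) :
    PySem.Raise.InRange l.length (PySem.Int.floordiv (PySem.List.len l) 2) := by
  have hn : 0 < l.length := List.length_pos_iff.mpr hl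
  simp [PySem.Raise.InRange, PySem.List.len]
  omega

-- B's while loop as a recursion over (l, k, total); the `[]` branch is unreachable under
-- the invariant k ≤ l.length (Python would raise there) and only makes the function total.
def pvSelSum (l : List Int) (k : Nat) (total : Int) : Int :=
  if k = 0 then total
  else if hl : l = [] then total
  else
    let p := PySem.List.pyGetD l (PySem.Int.floordiv (PySem.List.len l) 2) 0
    let ltL := l.filter (fun x => decide (x < p))
    let eqL := l.filter (fun x => x == p)
    let gtL := l.filter (fun x => decide (p < x))
    if k ≤ ltL.length then pvSelSum ltL k total
    else if k ≤ ltL.length + eqL.length then total + ltL.sum + p * ((k : Int) - ltL.length)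
    else pvSelSum gtL (k - (ltL.length + eqL.length)) (total + ltL.sum + eqL.sum)
termination_by l.length
decreasing_by
  all_goals
    have hp := PySem.List.pyGetD_mem l 0 (pvPivot_inRange l hl)
    simp only [List.length_unattach]
    exact lt_of_lt_of_eq
      (pvFilter_lt_of_mem (l := l.attach) (p := ⟨_, hp⟩) (List.mem_attach _ _) (by simp))
      (List.length_attach ..)

def solution_709_1_alt (costs : List (List Int)) : Int :=
  let base := (costs.map (fun c => PySem.List.pyGetD c 1 0)).sum
  let l := costs.map (fun c => PySem.List.pyGetD c 0 0 - PySem.List.pyGetD c 1 0)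
  let k := l.length / 2
  base + pvSelSum l k 0

-- ===== PRECONDITION & SPEC =====
-- Pre_ excludes rows of length < 2, on which Python's c[0]/c[1] raises IndexError.
def Pre_solution_709_1 (costs : List (List Int)) : Prop := ∀ c ∈ costs, 2 ≤ c.length
instance (costs : List (List Int)) : Decidable (Pre_solution_709_1 costs) := by unfold Pre_solution_709_1; infer_instance
def pvWitness_solution_709_1 : List (List Int) := [[10, 20], [30, 200], [400, 50], [30, 20]]
def Spec_solution_709_1 (costs : List (List Int)) (out : Int) : Prop := out = solution_709_1_alt costs
instance (costs : List (List Int)) (out : Int) : Decidable (Spec_solution_709_1 costs out) := by unfold Spec_solution_709_1; infer_instance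

-- ===== CLAIM (what is proved, stated in full; the proofs are below) =====
def Claim_equal_solution_709_1 : Prop := ∀ (costs : List (List Int)), Dom_solution_709_1 costs → Pre_solution_709_1 costs → Spec_solution_709_1 costs (solution_709_1 costs)

-- ===== LEMMAS AND PROOFS =====

-- A's first loop (range(0, k), k ≤ len a) sums the first components of the first k rows.
theorem loopA_take (a : List (List Int)) (k : Nat) (hk : k ≤ a.length) :
    (PySem.List.pyRange 0 (k : Int)).foldl
      (fun s i => s + PySem.List.pyGetD (PySem.List.pyGetD a i []) 0 0) 0
    = ((a.take k).map (fun c => PySem.List.pyGetD c 0 0)).sum := by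
  induction k with
  | zero => simp
  | succ m ih =>
    have hm : m ≤ a.length := Nat.le_of_succ_le hk
    have hcast : ((m + 1 : Nat) : Int) = (m : Int) + 1 := by push_cast; ring
    rw [hcast, PySem.List.pyRange_one_succ_right (by positivity), List.foldl_append, ih hm]
    have hlt : m < a.length := hk
    have : PySem.List.pyGetD a (m : Int) [] = a[m] := by
      rw [PySem.List.pyGetD_natCast]; simp [List.getD, hlt]
    simp only [List.foldl_cons, List.foldl_nil, this]
    rw [List.take_add_one]
    simp [hlt]

-- small algebra: a sum of differences splits
theorem sum_map_sub_int {α : Type} (l : List α) (f g : α → Int) :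
    (l.map (fun x => f x - g x)).sum = (l.map f).sum - (l.map g).sum := by
  induction l with
  | nil => simp
  | cons x xs ih => simp [ih]; ring

-- the sorted diff list is the diff image of A's key-sorted row list
theorem sorted_diffs_eq (costs : List (List Int)) :
    PySem.List.sorted (costs.map (fun c => PySem.List.pyGetD c 0 0 - PySem.List.pyGetD c 1 0)) (fun x => x)
    = (PySem.List.sorted costs (fun x => PySem.List.pyGetD x 0 0 - PySem.List.pyGetD x 1 0)).map
        (fun c => PySem.List.pyGetD c 0 0 - PySem.List.pyGetD c 1 0) := by
  apply PySem.List.sorted_id_eq_of_perm_of_pairwise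
  · exact List.Perm.map _ (PySem.List.sorted_perm costs _ false)
  · exact PySem.List.sorted_map_key_pairwise costs _

-- the three-way partition is a permutation of the list
theorem part_perm (l : List Int) (p : Int) :
    (l.filter (fun x => decide (x < p)) ++ l.filter (fun x => x == p) ++ l.filter (fun x => decide (p < x))).Perm l := by
  induction l with
  | nil => simp
  | cons x xs ih =>
    rcases lt_trichotomy x p with h | h | h
    · simpa [List.filter_cons, h, h.ne, not_lt.mpr h.le] using ih.cons x
    · subst h
      have ih' : (xs.filter (fun y => decide (y < x)) ++ (xs.filter (fun y => y == x)
          ++ xs.filter (fun y => decide (x < y)))).Perm xs := by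
        simpa [List.append_assoc] using ih
      have hmid := List.perm_middle (a := x)
        (l₁ := xs.filter (fun y => decide (y < x)))
        (l₂ := xs.filter (fun y => y == x) ++ xs.filter (fun y => decide (x < y)))
      simp only [List.filter_cons, lt_irrefl, decide_false, beq_self_eq_true, if_true,
        List.append_assoc, List.cons_append]
      exact hmid.trans (ih'.cons x)
    · have ih' : ((xs.filter (fun y => decide (y < p)) ++ xs.filter (fun y => y == p))
          ++ xs.filter (fun y => decide (p < y))).Perm xs := by
        simpa [List.append_assoc] using ih
      have hmid := List.perm_middle (a := x)
        (l₁ := xs.filter (fun y => decide (y < p)) ++ xs.filter (fun y => y == p))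
        (l₂ := xs.filter (fun y => decide (p < y)))
      have hxp : ((x == p) = false) := by simp [ne_of_gt h]
      simp only [List.filter_cons, not_lt.mpr h.le, decide_eq_true h, hxp, decide_false,
        if_true, List.append_assoc, List.cons_append]
      simpa [List.append_assoc] using hmid.trans (ih'.cons x)

theorem part_len (l : List Int) (p : Int) :
    (l.filter (fun x => decide (x < p))).length + (l.filter (fun x => x == p)).length
      + (l.filter (fun x => decide (p < x))).length = l.length := by
  have := (part_perm l p).length_eq
  simp at this
  omega

-- every element of the eq-partition is the pivot, so its sums are multiples of p
theorem sum_all_eq {t : List Int} {p : Int} (h : ∀ x ∈ t, x = p) : t.sum = p * t.length := by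
  induction t with
  | nil => simp
  | cons x xs ih =>
    have hx := h x (by simp)
    have := ih (fun y hy => h y (by simp [hy]))
    simp [hx, this]; push_cast; ring

-- all elements of a list equal to p: trivially nondecreasing
theorem pairwise_of_all_eq {t : List Int} {p : Int} (h : ∀ x ∈ t, x = p) : t.Pairwise (· ≤ ·) := by
  induction t with
  | nil => simp
  | cons x xs ih =>
    refine List.pairwise_cons.mpr ⟨fun y hy => ?_, ih (fun y hy => h y (by simp [hy]))⟩
    rw [h x (by simp), h y (by simp [hy])]

-- sorted(l) decomposes along a three-way partition at any pivot
theorem sorted_part (l : List Int) (p : Int) :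
    PySem.List.sorted l (fun x => x)
    = PySem.List.sorted (l.filter (fun x => decide (x < p))) (fun x => x)
      ++ l.filter (fun x => x == p)
      ++ PySem.List.sorted (l.filter (fun x => decide (p < x))) (fun x => x) := by
  apply PySem.List.sorted_id_eq_of_perm_of_pairwise
  · exact (((PySem.List.sorted_perm _ _ false).append (List.Perm.refl _)).append
      (PySem.List.sorted_perm _ _ false)).trans (part_perm l p)
  · have hlt : ∀ x ∈ PySem.List.sorted (l.filter (fun x => decide (x < p))) (fun x => x) false, x < p := by
      intro x hx
      rw [PySem.List.mem_sorted] at hx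
      simpa using (List.mem_filter.mp hx).2
    have heq : ∀ x ∈ l.filter (fun x => x == p), x = p := by
      intro x hx
      simpa using (List.mem_filter.mp hx).2
    have hgt : ∀ x ∈ PySem.List.sorted (l.filter (fun x => decide (p < x))) (fun x => x) false, p < x := by
      intro x hx
      rw [PySem.List.mem_sorted] at hx
      simpa using (List.mem_filter.mp hx).2
    rw [List.pairwise_append]
    refine ⟨?_, PySem.List.sorted_pairwise _ _, ?_⟩
    · rw [List.pairwise_append]
      refine ⟨PySem.List.sorted_pairwise _ _, pairwise_of_all_eq heq, ?_⟩
      intro a ha b hb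
      exact le_of_lt (lt_of_lt_of_le (hlt a ha) (le_of_eq (heq b hb).symm))
    · intro a ha b hb
      rcases List.mem_append.mp ha with h | h
      · exact le_of_lt ((hlt a h).trans (hgt b hb))
      · exact le_of_lt (lt_of_le_of_lt (le_of_eq (heq a h)) (hgt b hb))

-- filter commutes with unattach (bridges the attach form fun_induction exposes)
theorem pvFU_lt {P : Int → Prop} (s : List {x : Int // P x}) (p : Int) :
    (s.filter (fun x => decide (x.1 < p))).unattach = s.unattach.filter (fun x => decide (x < p)) := by
  induction s with
  | nil => rfl
  | cons x xs ih => by_cases h : x.1 < p <;> simp [List.filter_cons, h, ih]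

theorem pvFU_eq {P : Int → Prop} (s : List {x : Int // P x}) (p : Int) :
    (s.filter (fun x => x.1 == p)).unattach = s.unattach.filter (fun x => x == p) := by
  induction s with
  | nil => rfl
  | cons x xs ih => by_cases h : x.1 = p <;> simp [List.filter_cons, h, ih]

theorem pvFU_gt {P : Int → Prop} (s : List {x : Int // P x}) (p : Int) :
    (s.filter (fun x => decide (p < x.1))).unattach = s.unattach.filter (fun x => decide (p < x)) := by
  induction s with
  | nil => rfl
  | cons x xs ih => by_cases h : p < x.1 <;> simp [List.filter_cons, h, ih]

-- quickselect sums the k smallest elements: pvSelSum l k t = t + sum(sorted(l)[:k])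
theorem pvSelSum_eq (l : List Int) (k : Nat) (t : Int) (hk : k ≤ l.length) :
    pvSelSum l k t = t + ((PySem.List.sorted l (fun x => x)).take k).sum := by
  fun_induction pvSelSum l k t with
  | case1 l t => simp
  | case2 k t h0 => simp at hk; omega
  | case3 l k t h0 hl p ltL hlt ih =>
      have hlt' : k ≤ (l.filter (fun x => decide (x < p))).length := by
        simpa only [ltL, pvFU_lt, pvFU_eq, pvFU_gt, List.unattach_attach] using hlt
      have ih' : pvSelSum (l.filter (fun x => decide (x < p))) k t
          = t + ((PySem.List.sorted (l.filter (fun x => decide (x < p))) (fun x => x)).take k).sum := by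
        simpa only [ltL, pvFU_lt, pvFU_eq, pvFU_gt, List.unattach_attach] using ih hlt
      rw [if_pos hlt', ih', sorted_part l p]
      have hA := PySem.List.length_sorted (l.filter (fun x => decide (x < p))) (fun x => x) false
      rw [List.take_append, List.take_append]
      have e1 : k - (PySem.List.sorted (l.filter (fun x => decide (x < p))) (fun x => x)).length = 0 := by omega
      have e2 : k - ((PySem.List.sorted (l.filter (fun x => decide (x < p))) (fun x => x))
          ++ l.filter (fun x => x == p)).length = 0 := by simp; omega
      rw [e1, e2]
      simp
  | case4 l k t h0 hl p ltL eqL hnlt hle =>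
      have hnlt' : ¬ k ≤ (l.filter (fun x => decide (x < p))).length := by
        simpa only [ltL, pvFU_lt, pvFU_eq, pvFU_gt, List.unattach_attach] using hnlt
      have hle' : k ≤ (l.filter (fun x => decide (x < p))).length + (l.filter (fun x => x == p)).length := by
        simpa only [ltL, eqL, pvFU_lt, pvFU_eq, pvFU_gt, List.unattach_attach] using hle
      rw [if_neg hnlt', if_pos hle', sorted_part l p]
      have hA := PySem.List.length_sorted (l.filter (fun x => decide (x < p))) (fun x => x) false
      rw [List.take_append, List.take_append]
      have e2 : k - ((PySem.List.sorted (l.filter (fun x => decide (x < p))) (fun x => x))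
          ++ l.filter (fun x => x == p)).length = 0 := by simp; omega
      rw [e2, List.take_of_length_le (by omega)]
      have hperm : (PySem.List.sorted (l.filter (fun x => decide (x < p))) (fun x => x)).sum
          = (l.filter (fun x => decide (x < p))).sum :=
        (PySem.List.sorted_perm _ _ false).sum_eq
      have htake : ((l.filter (fun x => x == p)).take
          (k - (PySem.List.sorted (l.filter (fun x => decide (x < p))) (fun x => x)).length)).sum
          = p * (k - (l.filter (fun x => decide (x < p))).length : Nat) := by
        rw [sum_all_eq (fun x hx => by
          simpa using (List.mem_filter.mp (List.take_subset _ _ hx)).2)]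
        congr 1
        rw [List.length_take]
        simp at hle' ⊢
        omega
      simp only [List.sum_append, hperm, htake, List.take_zero, List.sum_nil, add_zero]
      push_cast [Nat.cast_sub ((not_le.mp hnlt').le)]
      ring
  | case5 l k t h0 hl p ltL eqL gtL hnlt hnle ih =>
      have hnlt' : ¬ k ≤ (l.filter (fun x => decide (x < p))).length := by
        simpa only [ltL, pvFU_lt, pvFU_eq, pvFU_gt, List.unattach_attach] using hnlt
      have hnle' : ¬ k ≤ (l.filter (fun x => decide (x < p))).length + (l.filter (fun x => x == p)).length := by
        simpa only [ltL, eqL, pvFU_lt, pvFU_eq, pvFU_gt, List.unattach_attach] using hnle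
      rw [if_neg hnlt', if_neg hnle']
      have hpl := part_len l p
      have hk' : k - ((l.filter (fun x => decide (x < p))).length
          + (l.filter (fun x => x == p)).length) ≤ (l.filter (fun x => decide (p < x))).length := by
        omega
      have hk2 : k - (ltL.length + eqL.length) ≤ gtL.length := by
        simpa only [ltL, eqL, gtL, pvFU_lt, pvFU_eq, pvFU_gt, List.unattach_attach] using hk'
      have ih' : pvSelSum (l.filter (fun x => decide (p < x)))
            (k - ((l.filter (fun x => decide (x < p))).length + (l.filter (fun x => x == p)).length))
            (t + (l.filter (fun x => decide (x < p))).sum + (l.filter (fun x => x == p)).sum)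
          = (t + (l.filter (fun x => decide (x < p))).sum + (l.filter (fun x => x == p)).sum)
            + ((PySem.List.sorted (l.filter (fun x => decide (p < x))) (fun x => x)).take
                (k - ((l.filter (fun x => decide (x < p))).length + (l.filter (fun x => x == p)).length))).sum := by
        simpa only [ltL, eqL, gtL, pvFU_lt, pvFU_eq, pvFU_gt, List.unattach_attach] using ih hk2
      rw [ih', sorted_part l p]
      have hA := PySem.List.length_sorted (l.filter (fun x => decide (x < p))) (fun x => x) false
      rw [List.take_append,
        List.take_of_length_le (l := (PySem.List.sorted (l.filter (fun x => decide (x < p))) (fun x => x))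
          ++ l.filter (fun x => x == p)) (by simp only [List.length_append, hA]; omega)]
      have hperm : (PySem.List.sorted (l.filter (fun x => decide (x < p))) (fun x => x)).sum
          = (l.filter (fun x => decide (x < p))).sum :=
        (PySem.List.sorted_perm _ _ false).sum_eq
      have hidx : k - ((PySem.List.sorted (l.filter (fun x => decide (x < p))) (fun x => x))
            ++ l.filter (fun x => x == p)).length
          = k - ((l.filter (fun x => decide (x < p))).length + (l.filter (fun x => x == p)).length) := by
        simp only [List.length_append, hA]
      rw [hidx]
      simp only [List.sum_append, hperm]
      ring
-- ===== VERDICT (by name: the statement is the Claim_ definition above) =====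
theorem solution_709_1_spec : Claim_equal_solution_709_1 := by
  intro costs _ _
  unfold Spec_solution_709_1
  dsimp only [solution_709_1, solution_709_1_alt]
  set key : List Int → Int := fun x => PySem.List.pyGetD x 0 0 - PySem.List.pyGetD x 1 0 with hkey
  set a := PySem.List.sorted costs key with ha
  have hlen : a.length = costs.length := PySem.List.length_sorted costs key false
  set k : Nat := costs.length / 2 with hk
  have hfk : PySem.Int.floordiv (PySem.List.len a) 2 = (k : Int) := by
    simp only [PySem.List.len, hlen]
    exact_mod_cast PySem.Int.floordiv_natCast costs.length 2
  have hkle : k ≤ a.length := by omega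
  rw [hfk, loopA_take a k hkle]
  have hsb : (PySem.List.pyRange (k : Int) (PySem.List.len a)).foldl
      (fun s i => s + PySem.List.pyGetD (PySem.List.pyGetD a i []) 1 0) 0
      = ((a.drop k).map (fun c => PySem.List.pyGetD c 1 0)).sum := by
    rw [PySem.List.foldl_pyRange_pyGetD a [] (fun s c => s + PySem.List.pyGetD c 1 0) 0 (by positivity)]
    rw [PySem.List.foldl_add]
    simp
  rw [hsb]
  -- B's side: quickselect = take k of the sorted diffs
  have hklen : k ≤ (costs.map key).length := by simp; omega
  rw [show (costs.map key).length / 2 = k by simp [hk], pvSelSum_eq _ _ _ hklen,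
      sorted_diffs_eq, ← ha, ← hkey, ← List.map_take, sum_map_sub_int]
  have hperm : ((a.map (fun c => PySem.List.pyGetD c 1 0)).sum)
      = (costs.map (fun c => PySem.List.pyGetD c 1 0)).sum :=
    List.Perm.sum_eq (List.Perm.map _ (PySem.List.sorted_perm costs key false))
  have hsplit : (a.map (fun c => PySem.List.pyGetD c 1 0)).sum
      = ((a.take k).map (fun c => PySem.List.pyGetD c 1 0)).sum
        + ((a.drop k).map (fun c => PySem.List.pyGetD c 1 0)).sum := by
    conv_lhs => rw [← List.take_append_drop k a]
    simp
  rw [← hperm, hsplit]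
  ring
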